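-- pv_equiv track=rewrite | github.com/CarlosOrqueda/TP1 | resubido.py | string_corto
-- ===== SOURCE A (Python) =====
-- def string_corto(valor1):
--     cadena = valor1
--     outside = "  "
--     inside = ".,;"
--     trans = cadena.maketrans(".,;!", "    ")
--     cadena = cadena.translate(trans)
--     lista_cadena = cadena.split()
--     palabra_corta = lista_cadena[0]
--     lista_auxiliar = []
--     for i in lista_cadena:
--         if len(palabra_corta) > len(i):
--             del lista_auxiliar[::]
--             palabra_corta = i
--             lista_auxiliar.append(palabra_corta)
--         elif len(palabra_corta) == len(i):
--             lista_auxiliar.append(i)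
--             palabra_corta = i
--     cantidad = len(palabra_corta)
--     palabras_cortas = str(lista_auxiliar)
--     palabras_cortas_mensaje = "La/s palabra/s mas corta/s es/son {}, incluyendo numeros y tiene {} caracteres.".format(
--         palabras_cortas, cantidad)
--     return palabras_cortas_mensaje  # palabras_cortas
-- ===== SOURCE B (Python) =====
-- def string_corto(valor1):
--     palabras = valor1.translate(str.maketrans(".,;!", "    ")).split()
--     por_longitud = {}
--     for p in palabras:
--         por_longitud.setdefault(len(p), []).append(p)
--     cantidad = min(por_longitud)
--     cortas = por_longitud[cantidad]
--     return ("La/s palabra/s mas corta/s es/son {}, incluyendo numeros y tiene {}"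
--             " caracteres.".format(cortas, cantidad))
-- ===== Notes on version B (the rewrite author's own statement) =====
-- stated objective: alternative
-- what changed: Replaces A's single-pass reset-and-track accumulator loop with a bucket-by-length dict (setdefault/append) followed by min over the keys and a lookup of the minimal bucket; Pre_ excludes strings with no word after the punctuation replacement, on which A raises IndexError (and B ValueError).
import Mathlib
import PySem

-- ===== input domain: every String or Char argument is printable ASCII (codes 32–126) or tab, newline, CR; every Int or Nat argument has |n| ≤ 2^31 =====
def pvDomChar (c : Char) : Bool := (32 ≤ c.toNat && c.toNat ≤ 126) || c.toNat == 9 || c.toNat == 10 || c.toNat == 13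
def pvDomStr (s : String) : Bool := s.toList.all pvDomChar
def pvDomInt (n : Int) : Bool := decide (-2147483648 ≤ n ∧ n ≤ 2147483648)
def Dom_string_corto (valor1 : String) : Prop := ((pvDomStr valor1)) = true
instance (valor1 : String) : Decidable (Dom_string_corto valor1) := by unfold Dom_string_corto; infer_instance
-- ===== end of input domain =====

-- B buckets the words by length in a dict and takes the bucket of the minimal key, instead of
-- A's single-pass reset-and-track accumulator; same return value ('alternative' objective).
-- Shared builtin helpers (the translate table, repr of a str, str of a list of str, the
-- .format message), used identically by both Pythons through the builtins they call:

-- cadena.translate(cadena.maketrans(".,;!", "    ")) applied per character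
def pvTransChar (c : Char) : Char :=
  if c = '.' ∨ c = ',' ∨ c = ';' ∨ c = '!' then ' ' else c

-- Python repr(s) for strings without control characters: choose the quote, escape \ and the quote
def pvReprStr (s : String) : String :=
  let cs := s.toList
  if '\'' ∈ cs ∧ '"' ∉ cs then
    String.ofList ('"' :: (cs.flatMap fun c => if c = '\\' then ['\\', '\\'] else [c]) ++ ['"'])
  else
    String.ofList ('\'' :: (cs.flatMap fun c =>
      if c = '\\' then ['\\', '\\'] else if c = '\'' then ['\\', '\''] else [c]) ++ ['\''])

-- str(lst) for a list of strings
def pvStrList (lst : List String) : String :=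
  "[" ++ PySem.Str.join ", " (lst.map pvReprStr) ++ "]"

-- the common .format(...) message
def pvMensaje (palabras_cortas : String) (cantidad : Int) : String :=
  "La/s palabra/s mas corta/s es/son " ++ palabras_cortas ++
    ", incluyendo numeros y tiene " ++ PySem.Int.toStr cantidad ++ " caracteres."

-- ===== PORT A =====
-- the for-loop over lista_cadena with state (palabra_corta, lista_auxiliar)
def pvLoopA : List String → String → List String → String × List String
  | [], pc, aux => (pc, aux)
  | i :: rest, pc, aux =>
    if PySem.Str.len pc > PySem.Str.len i then
      pvLoopA rest i [i]                       -- del lista_auxiliar[::]; append the new word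
    else if PySem.Str.len pc = PySem.Str.len i then
      pvLoopA rest i (aux ++ [i])
    else
      pvLoopA rest pc aux

def string_corto (valor1 : String) : String :=
  let cadena := String.ofList (valor1.toList.map pvTransChar)
  let lista_cadena := PySem.Str.split₀ cadena
  match lista_cadena with
  | [] => ""                                    -- lista_cadena[0] raises IndexError: outside Pre_
  | h :: t =>
    let res := pvLoopA (h :: t) h []
    let cantidad := PySem.Str.len res.1
    let palabras_cortas := pvStrList res.2
    pvMensaje palabras_cortas cantidad

-- ===== PORT B =====
def string_corto_alt (valor1 : String) : String :=
  let palabras := PySem.Str.split₀ (String.ofList (valor1.toList.map pvTransChar))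
  -- por_longitud.setdefault(len(p), []).append(p)  ==  d[len p] = d.get(len p, []) + [p]
  let por_longitud : PySem.Dict Int (List String) :=
    palabras.foldl (fun d p => d.modify (PySem.Str.len p) [] (· ++ [p])) PySem.Dict.empty
  match PySem.List.min? por_longitud.keys (fun k => k) with
  | none => ""                                  -- min({}) raises ValueError: outside Pre_
  | some cantidad =>
    match por_longitud.get? cantidad with
    | none => ""                                -- unreachable: cantidad is a key
    | some cortas => pvMensaje (pvStrList cortas) cantidad

-- ===== PRECONDITION & SPEC =====
-- Pre_ excludes exactly the inputs with no word after the punctuation replacement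
-- (empty/whitespace-punctuation-only strings), on which A raises IndexError.
def Pre_string_corto (valor1 : String) : Prop :=
  PySem.Str.split₀ (String.ofList (valor1.toList.map pvTransChar)) ≠ []
instance (valor1 : String) : Decidable (Pre_string_corto valor1) := by
  unfold Pre_string_corto; infer_instance

def pvWitness_string_corto : String := "hola, mundo!"

def Spec_string_corto (valor1 : String) (out : String) : Prop := out = string_corto_alt valor1
instance (valor1 : String) (out : String) : Decidable (Spec_string_corto valor1 out) := by
  unfold Spec_string_corto; infer_instance

-- ===== CLAIM (what is proved, stated in full; the proofs are below) =====
def Claim_equal_string_corto : Prop := ∀ (valor1 : String), Dom_string_corto valor1 → Pre_string_corto valor1 → Spec_string_corto valor1 (string_corto valor1)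

-- ===== LEMMAS AND PROOFS =====

-- A's loop: the final palabra_corta has the minimum length seen, and lista_auxiliar holds
-- exactly the words of that length (the accumulated prefix survives iff no shorter word came).

theorem pvFoldMin_le (ws : List String) (m : Int) :
    ws.foldl (fun m w => min m (PySem.Str.len w)) m ≤ m := by
  induction ws generalizing m with
  | nil => simp
  | cons i rest ih =>
    simp only [List.foldl]
    exact le_trans (ih _) (min_le_left _ _)

theorem pvLoopA_spec (ws : List String) (pc : String) (aux : List String) :
    PySem.Str.len (pvLoopA ws pc aux).1 =
      ws.foldl (fun m w => min m (PySem.Str.len w)) (PySem.Str.len pc) ∧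
    (pvLoopA ws pc aux).2 =
      (if ws.foldl (fun m w => min m (PySem.Str.len w)) (PySem.Str.len pc) < PySem.Str.len pc
       then [] else aux) ++
      ws.filter (fun w => PySem.Str.len w =
        ws.foldl (fun m w => min m (PySem.Str.len w)) (PySem.Str.len pc)) := by
  induction ws generalizing pc aux with
  | nil => simp [pvLoopA]
  | cons i rest ih =>
    simp only [pvLoopA, List.foldl]
    by_cases h1 : PySem.Str.len pc > PySem.Str.len i
    · -- shorter word found: reset the accumulator
      have hmin : min (PySem.Str.len pc) (PySem.Str.len i) = PySem.Str.len i :=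
        min_eq_right (le_of_lt h1)
      have hFi := pvFoldMin_le rest (PySem.Str.len i)
      rw [if_pos h1]; simp only [hmin]
      obtain ⟨ih1, ih2⟩ := ih i [i]
      refine ⟨ih1, ?_⟩
      rw [ih2, List.filter_cons, if_pos (lt_of_le_of_lt hFi h1), List.nil_append]
      by_cases hF : rest.foldl (fun m w => min m (PySem.Str.len w)) (PySem.Str.len i) =
          PySem.Str.len i
      · rw [if_neg (by omega), if_pos (by simp only [decide_eq_true_eq]; omega)]
        rfl
      · rw [if_pos (by omega), if_neg (by simp only [decide_eq_true_eq]; omega)]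
        rfl
    · by_cases h2 : PySem.Str.len pc = PySem.Str.len i
      · -- equal length: append the word
        have hmin : min (PySem.Str.len pc) (PySem.Str.len i) = PySem.Str.len i := by omega
        have hFi := pvFoldMin_le rest (PySem.Str.len i)
        rw [if_neg h1, if_pos h2]; simp only [hmin]
        obtain ⟨ih1, ih2⟩ := ih i (aux ++ [i])
        refine ⟨ih1, ?_⟩
        rw [ih2, List.filter_cons]
        by_cases hF : rest.foldl (fun m w => min m (PySem.Str.len w)) (PySem.Str.len i) =
            PySem.Str.len i
        · rw [if_neg (by omega), if_neg (by omega),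
            if_pos (by simp only [decide_eq_true_eq]; omega), List.append_assoc]
          rfl
        · rw [if_pos (by omega), if_pos (by omega),
            if_neg (by simp only [decide_eq_true_eq]; omega)]
      · -- longer word: skip it
        have h3 : PySem.Str.len pc < PySem.Str.len i := by omega
        have hmin : min (PySem.Str.len pc) (PySem.Str.len i) = PySem.Str.len pc := by omega
        have hFp := pvFoldMin_le rest (PySem.Str.len pc)
        rw [if_neg h1, if_neg h2]; simp only [hmin]
        obtain ⟨ih1, ih2⟩ := ih pc aux
        refine ⟨ih1, ?_⟩
        rw [ih2, List.filter_cons]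
        congr 1
        rw [if_neg (by simp only [decide_eq_true_eq]; omega)]

-- B's grouping dict: the bucket at k collects exactly the words of length k (in order)
theorem pvGroup_getD (ws : List String) (d : PySem.Dict Int (List String)) (k : Int) :
    (ws.foldl (fun d p => d.modify (PySem.Str.len p) [] (· ++ [p])) d).getD k [] =
      d.getD k [] ++ ws.filter (fun w => PySem.Str.len w = k) := by
  induction ws generalizing d with
  | nil => simp
  | cons p rest ih =>
    simp only [List.foldl, List.filter_cons]
    rw [ih, PySem.Dict.getD_modify]
    by_cases hk : k = PySem.Str.len p
    · subst hk
      rw [if_pos rfl, if_pos (by simp)]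
      simp
    · rw [if_neg hk, if_neg (by simpa using fun h => hk h.symm)]

-- and its key set is the set of word lengths
theorem pvGroup_mem_keys (ws : List String) (d : PySem.Dict Int (List String)) (k : Int) :
    k ∈ (ws.foldl (fun d p => d.modify (PySem.Str.len p) [] (· ++ [p])) d).keys ↔
      k ∈ d.keys ∨ k ∈ ws.map PySem.Str.len := by
  induction ws generalizing d with
  | nil => simp
  | cons p rest ih =>
    simp only [List.foldl, List.map_cons, List.mem_cons]
    rw [ih]
    have : k ∈ (d.modify (PySem.Str.len p) [] (· ++ [p])).keys ↔
        k = PySem.Str.len p ∨ k ∈ d.keys := by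
      rw [← PySem.Dict.contains_iff_mem_keys, PySem.Dict.contains_modify,
        ← PySem.Dict.contains_iff_mem_keys]
      simp
    rw [this]; tauto

-- ===== VERDICT (by name: the statement is the Claim_ definition above) =====
theorem string_corto_spec : Claim_equal_string_corto := by
  intro valor1 _hdom hpre
  unfold Spec_string_corto Pre_string_corto at *
  simp only [string_corto, string_corto_alt]
  cases hsplit : PySem.Str.split₀ (String.ofList (valor1.toList.map pvTransChar)) with
  | nil => exact absurd hsplit hpre
  | cons h t =>
    -- A's side reduces to the (min length, filter) pair
    simp only [pvLoopA, gt_iff_lt, lt_irrefl, if_false, if_true, List.nil_append]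
    obtain ⟨h1, h2⟩ := pvLoopA_spec t h [h]
    have hFh := pvFoldMin_le t (PySem.Str.len h)
    set M := t.foldl (fun m w => min m (PySem.Str.len w)) (PySem.Str.len h) with hM
    -- B's side: the grouping dict g
    set g := (h :: t).foldl (fun d p => d.modify (PySem.Str.len p) [] (· ++ [p]))
      (PySem.Dict.empty : PySem.Dict Int (List String)) with hg
    -- M is the value of min over the length list
    have hmapmin : PySem.List.min? ((h :: t).map PySem.Str.len) (fun k => k) = some M := by
      rw [List.map_cons, PySem.List.min?_id_cons, hM, List.foldl_map]
    have hMmem : M ∈ (h :: t).map PySem.Str.len := PySem.List.min?_mem hmapmin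
    have hkeys : ∀ k, k ∈ g.keys ↔ k ∈ (h :: t).map PySem.Str.len := by
      intro k; rw [hg, pvGroup_mem_keys]; simp
    -- min over the keys is also M
    have hkne : g.keys ≠ [] := by
      intro hnil
      have := (hkeys M).2 hMmem
      simp [hnil] at this
    obtain ⟨m, hm⟩ : ∃ m, PySem.List.min? g.keys (fun k => k) = some m := by
      cases hmk : PySem.List.min? g.keys (fun k => k) with
      | none => exact absurd ((PySem.List.min?_eq_none_iff _ _).1 hmk) hkne
      | some m => exact ⟨m, rfl⟩
    have hmM : m = M := by
      have hmem : m ∈ g.keys := PySem.List.min?_mem hm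
      have h1' : M ≤ m := PySem.List.min?_isMin hmapmin m ((hkeys m).1 hmem)
      have h2' : m ≤ M := PySem.List.min?_isMin hm M ((hkeys M).2 hMmem)
      omega
    rw [hm, hmM]
    simp only []
    -- the bucket at M is the filter, and get? returns it
    have hbucket : g.getD M [] = (h :: t).filter (fun w => PySem.Str.len w = M) := by
      rw [hg, pvGroup_getD]; simp
    have hcontains : g.contains M = true := by
      rw [PySem.Dict.contains_iff_mem_keys]
      exact (hkeys M).2 hMmem
    have hget : g.get? M = some ((h :: t).filter (fun w => PySem.Str.len w = M)) := by
      rw [PySem.Dict.contains_eq_isSome_get?] at hcontains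
      cases hq : g.get? M with
      | none => rw [hq] at hcontains; simp at hcontains
      | some v =>
        have : g.getD M [] = v := by simp [PySem.Dict.getD, hq]
        rw [← hbucket, ← this]
    simp only [hget, h1, h2]
    congr 2
    rw [List.filter_cons]
    by_cases hF : M = PySem.Str.len h
    · rw [if_neg (by omega), if_pos (by simp only [decide_eq_true_eq]; omega)]
      rfl
    · rw [if_pos (by omega), if_neg (by simp only [decide_eq_true_eq]; omega)]
      rfl
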